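-- pv_equiv track=rewrite | github.com/RobbeW/Data_Statistiek_R | Deel 3 Algoritmiek/02 Dictionaries/Evaluatie/01 Voornamen/solution/solution.nl.py | omvormen
-- ===== SOURCE A (Python) =====
-- def omvormen(voornamen):
--     omgevormd = {}
--
--     for voornaam, aantal in voornamen.items():
--         if aantal in omgevormd:
--             omgevormd[aantal].append(voornaam)
--         else:
--             omgevormd[aantal] = [voornaam]
--
--     return omgevormd
-- ===== SOURCE B (Python) =====
-- def omvormen(voornamen):
--     items = list(voornamen.items())
--     return {a: [v for v, c in items if c == a]
--             for a in dict.fromkeys(c for _, c in items)}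
-- ===== Notes on version B (the rewrite author's own statement) =====
-- stated objective: idiomatic
-- what changed: Replaces the incremental dict-with-append build by a dict comprehension: first collect the distinct counts in first-occurrence order with dict.fromkeys, then gather the names for each count with one filtering comprehension per count.
import Mathlib
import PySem

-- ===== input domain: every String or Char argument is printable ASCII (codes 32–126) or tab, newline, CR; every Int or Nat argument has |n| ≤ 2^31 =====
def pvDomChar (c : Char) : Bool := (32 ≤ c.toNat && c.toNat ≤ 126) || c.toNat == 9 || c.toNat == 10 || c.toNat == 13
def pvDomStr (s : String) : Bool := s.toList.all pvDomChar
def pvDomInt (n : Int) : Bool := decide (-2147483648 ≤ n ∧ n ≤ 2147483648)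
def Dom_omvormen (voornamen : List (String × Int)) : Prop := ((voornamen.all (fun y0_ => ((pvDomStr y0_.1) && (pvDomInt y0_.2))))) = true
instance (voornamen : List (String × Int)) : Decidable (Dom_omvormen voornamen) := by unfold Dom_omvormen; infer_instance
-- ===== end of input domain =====

-- B groups names by count via a dict comprehension over the distinct counts (kept in
-- first-occurrence order) instead of A's incremental dict-with-append build; idiomatic, not faster.

-- ===== PORT A =====
-- exact assoc-list dict semantics: `omgevormd[aantal].append(voornaam)` appends to the
-- value of the (unique) entry for `aantal`, keeping its position
def dAppend (d : List (Int × List String)) (a : Int) (v : String) : List (Int × List String) :=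
  match d with
  | [] => []
  | (k, l) :: t => if k = a then (k, l ++ [v]) :: t else (k, l) :: dAppend t a v

def omvormen (voornamen : List (String × Int)) : List (Int × List String) :=
  voornamen.foldl (fun d p =>
    if (d.map Prod.fst).contains p.2 then dAppend d p.2 p.1
    else d ++ [(p.2, [p.1])]) []

-- ===== PORT B =====
-- port of `dict.fromkeys(...)`'s key list: distinct elements, first-occurrence order
def pyDedup (seen : List Int) : List Int → List Int
  | [] => []
  | c :: t => if seen.contains c then pyDedup seen t else c :: pyDedup (seen ++ [c]) t

def omvormen_alt (voornamen : List (String × Int)) : List (Int × List String) :=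
  (pyDedup [] (voornamen.map Prod.snd)).map
    (fun a => (a, (voornamen.filter (fun p => p.2 == a)).map Prod.fst))

-- ===== PRECONDITION & SPEC =====
def Spec_omvormen (voornamen : List (String × Int)) (out : List (Int × List String)) : Prop := out = omvormen_alt voornamen
instance (voornamen : List (String × Int)) (out : List (Int × List String)) : Decidable (Spec_omvormen voornamen out) := by unfold Spec_omvormen; infer_instance

-- ===== CLAIM (what is proved, stated in full; the proofs are below) =====
def Claim_equal_omvormen : Prop := ∀ (voornamen : List (String × Int)), Dom_omvormen voornamen → Spec_omvormen voornamen (omvormen voornamen)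

-- ===== LEMMAS AND PROOFS =====

-- the names carrying count `a`, in order
def nm (a : Int) (xs : List (String × Int)) : List String :=
  (xs.filter (fun p => p.2 == a)).map Prod.fst

theorem nm_cons (a k : Int) (v : String) (t : List (String × Int)) :
    nm k ((v, a) :: t) = if a = k then v :: nm k t else nm k t := by
  simp only [nm, List.filter_cons]
  by_cases h : a = k <;> simp [h]

theorem map_nm_cons_of_not_mem (a : Int) (v : String) (t : List (String × Int))
    (e : List (Int × List String)) (h : a ∉ e.map Prod.fst) :
    e.map (fun kv => (kv.1, kv.2 ++ nm kv.1 ((v, a) :: t)))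
      = e.map (fun kv => (kv.1, kv.2 ++ nm kv.1 t)) := by
  induction e with
  | nil => rfl
  | cons kv tl ih =>
    simp only [List.map_cons, List.mem_cons, not_or] at h ⊢
    refine congrArg₂ List.cons ?_ (ih h.2)
    rw [nm_cons, if_neg (fun hk => h.1 hk)]

theorem map_nm_pyDedup (a : Int) (v : String) (t : List (String × Int))
    (seen : List Int) (l : List Int) (h : a ∈ seen) :
    (pyDedup seen l).map (fun a' => (a', nm a' ((v, a) :: t)))
      = (pyDedup seen l).map (fun a' => (a', nm a' t)) := by
  induction l generalizing seen with
  | nil => rfl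
  | cons c l ih =>
    simp only [pyDedup]
    by_cases hc : seen.contains c
    · rw [if_pos hc]; exact ih seen h
    · rw [if_neg hc]
      simp only [List.map_cons]
      refine congrArg₂ List.cons ?_ (ih (seen ++ [c]) (by simp [h]))
      rw [nm_cons, if_neg ?_]
      intro he; subst he
      exact hc (by simpa using h)

theorem dAppend_eq (a : Int) (v : String) (t : List (String × Int))
    (d : List (Int × List String)) (hnd : (d.map Prod.fst).Nodup)
    (hmem : a ∈ d.map Prod.fst) :
    (dAppend d a v).map (fun kv => (kv.1, kv.2 ++ nm kv.1 t))
      = d.map (fun kv => (kv.1, kv.2 ++ nm kv.1 ((v, a) :: t))) := by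
  induction d with
  | nil => simp at hmem
  | cons kv tl ih =>
    obtain ⟨k, l⟩ := kv
    simp only [List.map_cons, List.nodup_cons] at hnd
    by_cases hk : k = a
    · subst hk
      simp only [dAppend, List.map_cons]
      refine congrArg₂ List.cons ?_ ?_
      · rw [nm_cons, if_pos rfl]; simp
      · exact (map_nm_cons_of_not_mem k v t tl hnd.1).symm
    · simp only [List.map_cons, List.mem_cons] at hmem
      have hmem' : a ∈ tl.map Prod.fst := by
        rcases hmem with h | h
        · exact absurd h.symm hk
        · exact h
      simp only [dAppend, if_neg hk, List.map_cons]
      refine congrArg₂ List.cons ?_ (ih hnd.2 hmem')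
      rw [nm_cons, if_neg (fun he => hk he.symm)]

theorem dAppend_keys (a : Int) (v : String) (d : List (Int × List String)) :
    (dAppend d a v).map Prod.fst = d.map Prod.fst := by
  induction d with
  | nil => rfl
  | cons kv tl ih =>
    obtain ⟨k, l⟩ := kv
    by_cases hk : k = a <;> simp [dAppend, hk, ih]

theorem main_lemma (xs : List (String × Int)) :
    ∀ (d : List (Int × List String)), (d.map Prod.fst).Nodup →
    xs.foldl (fun d p =>
        if (d.map Prod.fst).contains p.2 then dAppend d p.2 p.1
        else d ++ [(p.2, [p.1])]) d
      = d.map (fun kv => (kv.1, kv.2 ++ nm kv.1 xs))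
        ++ (pyDedup (d.map Prod.fst) (xs.map Prod.snd)).map (fun a => (a, nm a xs)) := by
  induction xs with
  | nil =>
    intro d _
    simp [pyDedup, nm]
  | cons p t ih =>
    intro d hnd
    obtain ⟨v, a⟩ := p
    simp only [List.foldl_cons, List.map_cons]
    by_cases hmem : a ∈ d.map Prod.fst
    · have hc : (d.map Prod.fst).contains a := by simpa using hmem
      rw [if_pos hc]
      rw [ih (dAppend d a v) (by rw [dAppend_keys]; exact hnd)]
      rw [dAppend_keys, dAppend_eq a v t d hnd hmem]
      simp only [pyDedup, if_pos hc]
      rw [map_nm_pyDedup a v t _ _ hmem]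
    · have hc : ¬ (d.map Prod.fst).contains a := by simpa using hmem
      rw [if_neg hc]
      have hnd' : ((d ++ [(a, [v])]).map Prod.fst).Nodup := by
        simp only [List.map_append, List.map_cons, List.map_nil]
        refine List.Nodup.append hnd (List.nodup_singleton _) ?_
        intro x hx hx'
        simp only [List.mem_singleton] at hx'
        subst hx'
        exact hmem hx
      rw [ih (d ++ [(a, [v])]) hnd']
      simp only [List.map_append, List.map_cons, List.map_nil, pyDedup, if_neg hc]
      rw [map_nm_cons_of_not_mem a v t d hmem]
      rw [map_nm_pyDedup a v t (d.map Prod.fst ++ [a]) (t.map Prod.snd) (by simp)]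
      simp [nm_cons, List.append_assoc]

-- ===== VERDICT (by name: the statement is the Claim_ definition above) =====
theorem omvormen_spec : Claim_equal_omvormen := by
  intro xs _
  show omvormen xs = omvormen_alt xs
  rw [omvormen, main_lemma xs [] (by simp)]
  simp [omvormen_alt, nm]
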